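-- pv_equiv track=rewrite | github.com/TeddyTeddy/Round_1_Task | Libraries/VerificationEngine.py | generate_weights_from_right_to_left
-- ===== SOURCE A (Python) =====
-- def generate_weights_from_right_to_left(number_of_decimal_digits):
--     weights = []
--     for i in range(0, number_of_decimal_digits):
--         which = i % 3
--         if which == 0:
--             weights.append(7)
--         if which == 1:
--             weights.append(3)
--         if which == 2:
--             weights.append(1)
--     return weights
-- ===== SOURCE B (Python) =====
-- def generate_weights_from_right_to_left(number_of_decimal_digits):
--     full_cycles = (number_of_decimal_digits + 2) // 3
--     return ([7, 3, 1] * full_cycles)[:number_of_decimal_digits]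
-- ===== Notes on version B (the rewrite author's own statement) =====
-- stated objective: idiomatic
-- what changed: Replaces the per-index loop with mod-3 branch tests by a single replicate-and-truncate: build ceil(n/3) copies of [7,3,1] with list multiplication and slice to length n.
import Mathlib
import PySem

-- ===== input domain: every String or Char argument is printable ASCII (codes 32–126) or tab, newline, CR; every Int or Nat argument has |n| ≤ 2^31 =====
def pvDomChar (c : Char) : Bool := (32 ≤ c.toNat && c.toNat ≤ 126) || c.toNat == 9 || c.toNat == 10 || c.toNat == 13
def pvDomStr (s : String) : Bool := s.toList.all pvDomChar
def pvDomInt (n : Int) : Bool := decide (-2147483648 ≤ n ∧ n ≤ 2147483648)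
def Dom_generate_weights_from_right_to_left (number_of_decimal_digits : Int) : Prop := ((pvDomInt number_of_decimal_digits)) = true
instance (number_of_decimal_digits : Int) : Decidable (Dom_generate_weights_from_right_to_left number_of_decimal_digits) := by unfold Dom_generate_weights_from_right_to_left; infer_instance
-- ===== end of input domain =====

-- B replaces A's per-index loop with mod-3 branch tests by a single
-- replicate-and-truncate construction (idiomatic; same O(n) cost).


-- ===== PORT A =====
-- one loop-body step: which = i % 3; three independent ifs appending
def pvStepA (weights : List Int) (i : Int) : List Int :=
  let which := PySem.Int.mod i 3
  let weights := if which = 0 then weights ++ [7] else weights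
  let weights := if which = 1 then weights ++ [3] else weights
  if which = 2 then weights ++ [1] else weights

def generate_weights_from_right_to_left (number_of_decimal_digits : Int) : List Int :=
  (PySem.List.pyRange 0 number_of_decimal_digits 1).foldl pvStepA []

-- ===== PORT B =====
def generate_weights_from_right_to_left_alt (number_of_decimal_digits : Int) : List Int :=
  let full_cycles := PySem.Int.floordiv (number_of_decimal_digits + 2) 3
  PySem.List.slice (List.flatten (List.replicate full_cycles.toNat [7, 3, 1]))
    none (some number_of_decimal_digits)

-- ===== PRECONDITION & SPEC =====
def Spec_generate_weights_from_right_to_left (number_of_decimal_digits : Int) (out : List Int) : Prop := out = generate_weights_from_right_to_left_alt number_of_decimal_digits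
instance (number_of_decimal_digits : Int) (out : List Int) : Decidable (Spec_generate_weights_from_right_to_left number_of_decimal_digits out) := by unfold Spec_generate_weights_from_right_to_left; infer_instance

-- ===== CLAIM (what is proved, stated in full; the proofs are below) =====
def Claim_equal_generate_weights_from_right_to_left : Prop := ∀ (number_of_decimal_digits : Int), Dom_generate_weights_from_right_to_left number_of_decimal_digits → Spec_generate_weights_from_right_to_left number_of_decimal_digits (generate_weights_from_right_to_left number_of_decimal_digits)

-- ===== LEMMAS AND PROOFS =====

-- the weight at index i
def pvW (i : Nat) : Int := if i % 3 = 0 then 7 else if i % 3 = 1 then 3 else 1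

theorem pvStepA_eq (acc : List Int) (i : Nat) : pvStepA acc (i : Int) = acc ++ [pvW i] := by
  have hmod : PySem.Int.mod (i : Int) 3 = ((i % 3 : Nat) : Int) := by
    exact_mod_cast PySem.Int.mod_natCast i 3
  have h : i % 3 = 0 ∨ i % 3 = 1 ∨ i % 3 = 2 := by omega
  rcases h with h | h | h <;> simp only [pvStepA, hmod, h] <;> norm_num [pvW, h]

theorem pvA_foldl (m : Nat) (acc : List Int) :
    ((List.range m).map (fun k : Nat => (k : Int))).foldl pvStepA acc
      = acc ++ (List.range m).map pvW := by
  induction m generalizing acc with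
  | zero => simp
  | succ m ih =>
      rw [List.range_succ]
      simp only [List.map_append, List.foldl_append, ih]
      simp [pvStepA_eq]

theorem pvFlatten_replicate (k : Nat) :
    List.flatten (List.replicate k ([7, 3, 1] : List Int)) = (List.range (3 * k)).map pvW := by
  induction k with
  | zero => simp
  | succ k ih =>
      have h3 : 3 * (k + 1) = 3 * k + 3 := by ring
      rw [h3, List.range_add, List.map_append, List.replicate_succ']
      rw [List.flatten_append, ih]
      congr 1
      simp [pvW, Nat.add_mod, List.range_succ]

theorem pvB_pos (n : Int) (hn : 0 < n) :
    generate_weights_from_right_to_left_alt n = (List.range n.toNat).map pvW := by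
  obtain ⟨m, rfl⟩ : ∃ m : Nat, n = (m : Int) := ⟨n.toNat, (Int.toNat_of_nonneg hn.le).symm⟩
  have hfd : PySem.Int.floordiv ((m : Int) + 2) 3 = (((m + 2) / 3 : Nat) : Int) := by
    exact_mod_cast PySem.Int.floordiv_natCast (m + 2) 3
  unfold generate_weights_from_right_to_left_alt
  simp only [hfd, Int.toNat_natCast]
  rw [PySem.List.slice_to_natCast, pvFlatten_replicate, ← List.map_take, List.take_range]
  have hmin : min m (3 * ((m + 2) / 3)) = m := by omega
  rw [hmin]

theorem pvEq (n : Int) :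
    generate_weights_from_right_to_left n = generate_weights_from_right_to_left_alt n := by
  rcases le_or_gt n 0 with hn | hn
  · -- both empty
    have hA : generate_weights_from_right_to_left n = [] := by
      unfold generate_weights_from_right_to_left
      rw [PySem.List.pyRange_one_eq_nil (by omega)]
      rfl
    have hk : (PySem.Int.floordiv (n + 2) 3).toNat = 0 := by
      have h1 : PySem.Int.floordiv (n + 2) 3 < 1 :=
        (PySem.Int.floordiv_lt_iff_lt_mul (by norm_num)).mpr (by omega)
      omega
    rw [hA]
    unfold generate_weights_from_right_to_left_alt
    simp only [hk, List.replicate_zero, List.flatten_nil]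
    simp [PySem.List.slice]
  · -- positive
    unfold generate_weights_from_right_to_left
    have hr : PySem.List.pyRange 0 n 1 = (List.range n.toNat).map (fun k : Nat => (k : Int)) := by
      rw [PySem.List.pyRange_one]
      simp
    rw [hr, pvA_foldl, pvB_pos n hn]
    simp

-- ===== VERDICT (by name: the statement is the Claim_ definition above) =====
theorem generate_weights_from_right_to_left_spec : Claim_equal_generate_weights_from_right_to_left := by
  intro n _
  unfold Spec_generate_weights_from_right_to_left
  exact pvEq n
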